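-- pv_equiv track=rewrite | github.com/mikefeneley/topcoder | src/SRM-172/skip_rope.py | partners
-- ===== SOURCE A (Python) =====
-- def partners(candidates, height):
--
--     first = (-1, 200)
--     second = (-1, 200)
--
--     for idx, person in enumerate(candidates):
--         diff = abs(person - height)
--
--         if diff < abs(first[1] - height):
--             first = (idx, person)
--         elif diff == abs(first[1] - height) and person > first[1]:
--             first = (idx, person)
--
--     for idx, person in enumerate(candidates):
--
--         if(idx != first[0]):
--
--             diff = abs(person - height)
--             old_diff = abs(second[1] - height)
--
--             if diff < old_diff:
--                 second = (idx, person)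
--             elif diff == abs(second[1] - height) and person > second[1]:
--                 second = (idx, person)
--
--     closest = (first[1], second[1])
--     closest = sorted(closest)
--     return closest
-- ===== SOURCE B (Python) =====
-- def partners(candidates, height):
--     # One pass: track the two best values directly (no indices, no second scan).
--     best = 200
--     second = 200
--     for person in candidates:
--         d = abs(person - height)
--         if d < abs(best - height) or (d == abs(best - height) and person > best):
--             best, second = person, best
--         elif d < abs(second - height) or (d == abs(second - height) and person > second):
--             second = person
--     return sorted((best, second))
-- ===== Notes on version B (the rewrite author's own statement) =====
-- stated objective: simpler
-- what changed: Replaces A's two enumerate passes with index bookkeeping by a single value-only pass that keeps (best, second) and demotes best into second when beaten.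
import Mathlib
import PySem

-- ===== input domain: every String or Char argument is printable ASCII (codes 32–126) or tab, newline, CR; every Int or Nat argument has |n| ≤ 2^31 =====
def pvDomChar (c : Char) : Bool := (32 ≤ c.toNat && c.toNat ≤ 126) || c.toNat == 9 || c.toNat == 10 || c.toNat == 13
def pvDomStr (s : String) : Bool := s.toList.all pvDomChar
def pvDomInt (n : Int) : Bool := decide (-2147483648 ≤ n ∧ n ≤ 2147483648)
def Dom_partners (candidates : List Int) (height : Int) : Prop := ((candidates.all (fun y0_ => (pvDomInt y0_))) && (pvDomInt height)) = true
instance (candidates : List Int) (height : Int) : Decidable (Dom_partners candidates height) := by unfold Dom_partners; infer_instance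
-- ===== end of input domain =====

-- ===== PORT A =====
def partners (candidates : List Int) (height : Int) : List Int :=
  let first := (PySem.List.enumerate candidates).foldl (fun first p =>
    let diff := |p.2 - height|
    if diff < |first.2 - height| then (p.1, p.2)
    else if diff = |first.2 - height| ∧ p.2 > first.2 then (p.1, p.2)
    else first) ((-1 : Int), (200 : Int))
  let second := (PySem.List.enumerate candidates).foldl (fun second p =>
    if p.1 ≠ first.1 then
      let diff := |p.2 - height|
      let old_diff := |second.2 - height|
      if diff < old_diff then (p.1, p.2)
      else if diff = |second.2 - height| ∧ p.2 > second.2 then (p.1, p.2)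
      else second
    else second) ((-1 : Int), (200 : Int))
  PySem.List.sorted [first.2, second.2] (fun x => x) false

-- ===== PORT B =====
-- One pass over the values only: keep (best, second), demote best when beaten.
def partners_alt (candidates : List Int) (height : Int) : List Int :=
  let bs := candidates.foldl (fun bs person =>
    let d := |person - height|
    if d < |bs.1 - height| ∨ (d = |bs.1 - height| ∧ person > bs.1) then (person, bs.1)
    else if d < |bs.2 - height| ∨ (d = |bs.2 - height| ∧ person > bs.2) then (bs.1, person)
    else bs) ((200 : Int), (200 : Int))
  PySem.List.sorted [bs.1, bs.2] (fun x => x) false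

-- ===== PRECONDITION & SPEC =====
def Spec_partners (candidates : List Int) (height : Int) (out : List Int) : Prop := out = partners_alt candidates height
instance (candidates : List Int) (height : Int) (out : List Int) : Decidable (Spec_partners candidates height out) := by unfold Spec_partners; infer_instance

-- ===== CLAIM (what is proved, stated in full; the proofs are below) =====
def Claim_equal_partners : Prop := ∀ (candidates : List Int) (height : Int), Dom_partners candidates height → Spec_partners candidates height (partners candidates height)

-- ===== LEMMAS AND PROOFS =====

-- named copies of the three fold steps (definitionally equal to the lambdas in the ports)
def stepA (height : Int) (first : Int × Int) (p : Int × Int) : Int × Int :=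
  let diff := |p.2 - height|
  if diff < |first.2 - height| then (p.1, p.2)
  else if diff = |first.2 - height| ∧ p.2 > first.2 then (p.1, p.2)
  else first

def stepA2 (height : Int) (fst : Int × Int) (second : Int × Int) (p : Int × Int) : Int × Int :=
  if p.1 ≠ fst.1 then
    let diff := |p.2 - height|
    let old_diff := |second.2 - height|
    if diff < old_diff then (p.1, p.2)
    else if diff = |second.2 - height| ∧ p.2 > second.2 then (p.1, p.2)
    else second
  else second

def stepB (height : Int) (bs : Int × Int) (person : Int) : Int × Int :=
  let d := |person - height|
  if d < |bs.1 - height| ∨ (d = |bs.1 - height| ∧ person > bs.1) then (person, bs.1)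
  else if d < |bs.2 - height| ∨ (d = |bs.2 - height| ∧ person > bs.2) then (bs.1, person)
  else bs

-- indices stay bounded through the first-pass fold
lemma foldA_idx_lt (h : Int) (L : List (Int × Int)) (f : Int × Int) (n : Int)
    (hL : ∀ p ∈ L, p.1 < n) (hf : f.1 < n) : (L.foldl (stepA h) f).1 < n := by
  induction L generalizing f with
  | nil => exact hf
  | cons p L ih =>
    refine ih _ (fun q hq => hL q (List.mem_cons_of_mem _ hq)) ?_
    have hp := hL p (List.mem_cons_self ..)
    simp only [stepA]
    split_ifs <;> simpa

-- when the excluded index never occurs, the second-pass step is the first-pass step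
lemma foldA2_eq_foldA (h : Int) (g : Int × Int) (L : List (Int × Int)) (s : Int × Int)
    (hL : ∀ p ∈ L, p.1 ≠ g.1) : L.foldl (stepA2 h g) s = L.foldl (stepA h) s := by
  induction L generalizing s with
  | nil => rfl
  | cons p L ih =>
    have hp := hL p (List.mem_cons_self ..)
    simp only [List.foldl_cons]
    rw [ih _ (fun q hq => hL q (List.mem_cons_of_mem _ hq))]
    congr 1
    simp [stepA2, stepA, hp]

-- one-pass state = (final first value, final second value) of the two-pass run
lemma main_fold (h : Int) (cs : List Int) :
    cs.foldl (stepB h) ((200 : Int), (200 : Int))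
    = ((((PySem.List.enumerate cs).foldl (stepA h) ((-1 : Int), (200 : Int))).2),
       (((PySem.List.enumerate cs).foldl
          (stepA2 h ((PySem.List.enumerate cs).foldl (stepA h) ((-1 : Int), (200 : Int))))
          ((-1 : Int), (200 : Int))).2)) := by
  induction cs using List.reverseRecOn with
  | nil => rfl
  | append_singleton l x ih =>
    have henum : PySem.List.enumerate (l ++ [x])
        = PySem.List.enumerate l ++ [((l.length : Int), x)] := by
      rw [PySem.List.enumerate_append]
      simp [PySem.List.enumerate_cons, PySem.List.enumerate_nil]
    have hbnd : ∀ p ∈ PySem.List.enumerate l, p.1 < (l.length : Int) := by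
      intro p hp
      rcases (PySem.List.mem_enumerate_iff _ _ _).1 hp with ⟨k, hk, rfl⟩
      simpa using (Int.ofNat_lt.2 hk)
    set f := (PySem.List.enumerate l).foldl (stepA h) ((-1 : Int), (200 : Int)) with hf
    set s := (PySem.List.enumerate l).foldl (stepA2 h f) ((-1 : Int), (200 : Int)) with hs
    have hfn : f.1 < (l.length : Int) := by
      refine foldA_idx_lt h _ _ _ hbnd ?_
      simp
      omega
    rw [henum, List.foldl_append, List.foldl_append, List.foldl_append, ih]
    simp only [List.foldl_cons, List.foldl_nil, ← hf]
    by_cases cA : |x - h| < |f.2 - h| ∨ (|x - h| = |f.2 - h| ∧ x > f.2)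
    · have hfa : stepA h f ((l.length : Int), x) = ((l.length : Int), x) := by
        simp only [stepA]
        rcases cA with cA | cA
        · rw [if_pos cA]
        · rw [if_neg (by omega), if_pos cA]
      rw [hfa]
      have hinner : (PySem.List.enumerate l).foldl (stepA2 h ((l.length : Int), x))
          ((-1 : Int), (200 : Int)) = f := by
        rw [foldA2_eq_foldA h _ _ _ (fun p hp => by have := hbnd p hp; simp; omega)]
      rw [hinner]
      have hskip : stepA2 h ((l.length : Int), x) f ((l.length : Int), x) = f := by
        simp [stepA2]
      rw [hskip]
      simp only [stepB]
      rw [if_pos cA]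
    · have hfa : stepA h f ((l.length : Int), x) = f := by
        simp only [stepA]
        rw [if_neg (by tauto), if_neg (by tauto)]
      rw [hfa, ← hs]
      have hne : ((l.length : Int), x).1 ≠ f.1 := by simp; omega
      by_cases cB : |x - h| < |s.2 - h| ∨ (|x - h| = |s.2 - h| ∧ x > s.2)
      · have hsa : stepA2 h f s ((l.length : Int), x) = ((l.length : Int), x) := by
          simp only [stepA2, if_pos hne]
          rcases cB with cB | cB
          · rw [if_pos cB]
          · rw [if_neg (by omega), if_pos cB]
        rw [hsa]
        simp only [stepB]
        rw [if_neg (by tauto), if_pos cB]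
      · have hsa : stepA2 h f s ((l.length : Int), x) = s := by
          simp only [stepA2, if_pos hne]
          rw [if_neg (by tauto), if_neg (by tauto)]
        rw [hsa]
        simp only [stepB]
        rw [if_neg (by tauto), if_neg (by tauto)]

-- ===== VERDICT (by name: the statement is the Claim_ definition above) =====
theorem partners_spec : Claim_equal_partners := by
  intro cs h _
  show partners cs h = partners_alt cs h
  have hmain := main_fold h cs
  change PySem.List.sorted [(((PySem.List.enumerate cs).foldl (stepA h) ((-1 : Int), (200 : Int))).2),
      (((PySem.List.enumerate cs).foldl
        (stepA2 h ((PySem.List.enumerate cs).foldl (stepA h) ((-1 : Int), (200 : Int))))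
        ((-1 : Int), (200 : Int))).2)] (fun x => x) false
    = PySem.List.sorted [(cs.foldl (stepB h) ((200 : Int), (200 : Int))).1,
      (cs.foldl (stepB h) ((200 : Int), (200 : Int))).2] (fun x => x) false
  rw [hmain]
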